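-- pv_equiv track=rewrite | github.com/wellquery12-glitch/data-interpreter | app/planner.py | _pick_numeric_like
-- ===== SOURCE A (Python) =====
-- from typing import Any, Dict, List, Optional
--
-- def _pick_numeric_like(cols: List[str]) -> Optional[str]:
--     preferred = ["weight", "amount", "price", "qty", "count", "total", "重量", "金额", "数量"]
--     low_map = {c.lower(): c for c in cols}
--     for k in preferred:
--         for lc, orig in low_map.items():
--             if k in lc:
--                 return orig
--     return cols[0] if cols else None
-- ===== SOURCE B (Python) =====
-- from typing import List, Optional
--
-- def _pick_numeric_like(cols: List[str]) -> Optional[str]: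
--     preferred = ["weight", "amount", "price", "qty", "count", "total", "重量", "金额", "数量"]
--     low_map = {}
--     for c in cols:
--         low_map[c.lower()] = c
--     best = None  # (keyword priority, original name); earlier-inserted column wins ties
--     for lc, orig in low_map.items():
--         p = next((i for i, k in enumerate(preferred) if k in lc), None)
--         if p is not None and (best is None or p < best[0]):
--             best = (p, orig)
--     if best is not None:
--         return best[1]
--     if not cols:
--         return None
--     return cols[0]
-- ===== Notes on version B (the rewrite author's own statement) =====
-- stated objective: alternative
-- what changed: Replaced A's keyword-outer nested scan (for each preferred keyword, rescan all dedup'd columns) by a single pass over the dedup'd columns that computes each column's best keyword index and keeps a strict-less running minimum, so ties go to the earlier-inserted column.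
import Mathlib
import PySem

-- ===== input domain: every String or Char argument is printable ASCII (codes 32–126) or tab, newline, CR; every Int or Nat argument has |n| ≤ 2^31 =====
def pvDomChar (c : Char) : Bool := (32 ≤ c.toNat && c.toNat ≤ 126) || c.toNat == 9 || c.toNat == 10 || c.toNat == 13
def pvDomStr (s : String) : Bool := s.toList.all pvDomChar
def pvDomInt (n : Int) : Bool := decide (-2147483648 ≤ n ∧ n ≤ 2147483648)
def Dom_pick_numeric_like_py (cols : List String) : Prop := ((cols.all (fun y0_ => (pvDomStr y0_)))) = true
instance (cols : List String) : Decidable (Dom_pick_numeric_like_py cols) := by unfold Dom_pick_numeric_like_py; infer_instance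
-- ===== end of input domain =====

-- B replaces A's keyword-outer nested scan by one pass over the dedup'd columns keeping a strict-less minimal-priority best (alternative decomposition, same cost).


-- ===== PORT A =====
def pvPreferredA : List String := ["weight", "amount", "price", "qty", "count", "total", "重量", "金额", "数量"]

-- low_map = {c.lower(): c for c in cols}
def pvLowMapA (cols : List String) : PySem.Dict String String :=
  cols.foldl (fun d c => d.insert (PySem.Str.lower c) c) PySem.Dict.empty

-- inner loop: for lc, orig in low_map.items(): if k in lc: return orig
def pvAInner (k : String) : List (String × String) → Option String
  | [] => none
  | (lc, orig) :: rest => if PySem.Str.isIn k lc then some orig else pvAInner k rest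

-- outer loop: for k in preferred: …
def pvAOuter (items : List (String × String)) : List String → Option String
  | [] => none
  | k :: ks =>
    match pvAInner k items with
    | some o => some o
    | none => pvAOuter items ks

def pick_numeric_like_py (cols : List String) : Option String :=
  match pvAOuter (pvLowMapA cols).items pvPreferredA with
  | some o => some o
  | none => match cols with
    | [] => none
    | c :: _ => some c

-- ===== PORT B =====
def pvPreferredB : List String := ["weight", "amount", "price", "qty", "count", "total", "重量", "金额", "数量"]

-- p = next((i for i, k in enumerate(preferred) if k in lc), None)
def pvPrio (lc : String) : List String → Option Nat
  | [] => none
  | k :: ks => if PySem.Str.isIn k lc then some 0 else (pvPrio lc ks).map (· + 1)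

-- if p is not None and (best is None or p < best[0]): best = (p, orig)
def pvStep (pref : List String) (best : Option (Nat × String)) (item : String × String) :
    Option (Nat × String) :=
  match pvPrio item.1 pref with
  | none => best
  | some p =>
    match best with
    | none => some (p, item.2)
    | some (q, _) => if p < q then some (p, item.2) else best

-- low_map = {c.lower(): c for c in cols}
def pvLowMapB (cols : List String) : PySem.Dict String String :=
  cols.foldl (fun d c => d.insert (PySem.Str.lower c) c) PySem.Dict.empty

def pick_numeric_like_py_alt (cols : List String) : Option String :=
  match (pvLowMapB cols).items.foldl (pvStep pvPreferredB) none with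
  | some (_, o) => some o
  | none => match cols with
    | [] => none
    | c :: _ => some c

-- ===== PRECONDITION & SPEC =====
def Spec_pick_numeric_like_py (cols : List String) (out : Option String) : Prop := out = pick_numeric_like_py_alt cols
instance (cols : List String) (out : Option String) : Decidable (Spec_pick_numeric_like_py cols out) := by unfold Spec_pick_numeric_like_py; infer_instance

-- ===== CLAIM (what is proved, stated in full; the proofs are below) =====
def Claim_equal_pick_numeric_like_py : Prop := ∀ (cols : List String), Dom_pick_numeric_like_py cols → Spec_pick_numeric_like_py cols (pick_numeric_like_py cols)

-- ===== LEMMAS AND PROOFS =====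

-- once the best has priority 0 it never changes
theorem pvFold_zero_fixed (ks : List String) (o : String) :
    ∀ items : List (String × String),
      items.foldl (pvStep ks) (some (0, o)) = some (0, o) := by
  intro items
  induction items with
  | nil => rfl
  | cons x t ih =>
    simp only [List.foldl_cons, pvStep]
    cases h : pvPrio x.1 ks with
    | none => exact ih
    | some p => simp only [Nat.not_lt_zero, if_false]; exact ih

-- if some item matches k, the fold with keyword list (k :: ks) lands on the first such item
theorem pvFold_match (k : String) (ks : List String) (o : String) :
    ∀ (items : List (String × String)) (acc : Option (Nat × String)),
      (∀ q r, acc = some (q, r) → 0 < q) →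
      pvAInner k items = some o →
      items.foldl (pvStep (k :: ks)) acc = some (0, o) := by
  intro items
  induction items with
  | nil => intro acc _ h; simp [pvAInner] at h
  | cons x t ih =>
    intro acc hacc hinner
    obtain ⟨lc, orig⟩ := x
    simp only [pvAInner] at hinner
    simp only [List.foldl_cons, pvStep, pvPrio]
    by_cases hk : PySem.Chars.isIn k.toList lc.toList
    · simp only [PySem.Str.isIn_eq, hk, if_true] at hinner ⊢
      cases hinner
      cases acc with
      | none => simpa using pvFold_zero_fixed (k :: ks) o t
      | some qr =>
        have h0 : 0 < qr.1 := hacc qr.1 qr.2 (by simp)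
        simpa [h0] using pvFold_zero_fixed (k :: ks) o t
    · simp only [PySem.Str.isIn_eq, hk] at hinner ⊢
      simp only [Bool.false_eq_true, if_false]
      cases hp : pvPrio lc ks with
      | none =>
        simp only [Option.map_none]
        exact ih acc hacc hinner
      | some p =>
        simp only [Option.map_some]
        cases acc with
        | none =>
          exact ih _ (by rintro q r ⟨⟩; omega) hinner
        | some qr =>
          by_cases hlt : p + 1 < qr.1
          · simp only [hlt, if_pos]
            exact ih _ (by rintro q r ⟨⟩; omega) hinner
          · simp only [hlt, if_false]
            exact ih _ hacc hinner

def pvShift : Nat × String → Nat × String := fun pr => (pr.1 + 1, pr.2)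

-- if no item matches k, folding with (k :: ks) is folding with ks, priorities shifted by one
theorem pvFold_nomatch (k : String) (ks : List String) :
    ∀ (items : List (String × String)) (acc : Option (Nat × String)),
      pvAInner k items = none →
      items.foldl (pvStep (k :: ks)) (acc.map pvShift) =
        (items.foldl (pvStep ks) acc).map pvShift := by
  intro items
  induction items with
  | nil => intro acc _; rfl
  | cons x t ih =>
    intro acc hinner
    obtain ⟨lc, orig⟩ := x
    simp only [pvAInner] at hinner
    by_cases hk : PySem.Chars.isIn k.toList lc.toList
    · simp [PySem.Str.isIn_eq, hk] at hinner
    · simp only [PySem.Str.isIn_eq, hk, Bool.false_eq_true, if_false] at hinner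
      simp only [List.foldl_cons, pvStep, pvPrio, PySem.Str.isIn_eq, hk, Bool.false_eq_true, if_false]
      cases hp : pvPrio lc ks with
      | none =>
        simp only [Option.map_none]
        exact ih acc hinner
      | some p =>
        simp only [Option.map_some]
        cases acc with
        | none =>
          simpa [pvShift] using ih (some (p, orig)) hinner
        | some qr =>
          simp only [Option.map_some, pvShift]
          by_cases hlt : p < qr.1
          · have : p + 1 < qr.1 + 1 := by omega
            simp only [hlt, this, if_pos]
            simpa [pvShift] using ih (some (p, orig)) hinner
          · have : ¬ (p + 1 < qr.1 + 1) := by omega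
            simp only [hlt, this, if_false]
            simpa [pvShift] using ih (some qr) hinner

-- with no keywords left the fold does nothing
theorem pvFold_nil (items : List (String × String)) (acc : Option (Nat × String)) :
    items.foldl (pvStep []) acc = acc := by
  induction items generalizing acc with
  | nil => rfl
  | cons x t ih => simp only [List.foldl_cons, pvStep, pvPrio]; exact ih acc

-- the nested search equals the single best-tracking pass
theorem pvSearch_eq (ks : List String) (items : List (String × String)) :
    pvAOuter items ks = (items.foldl (pvStep ks) none).map Prod.snd := by
  induction ks with
  | nil => simp [pvAOuter, pvFold_nil]
  | cons k ks ih =>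
    simp only [pvAOuter]
    cases h : pvAInner k items with
    | some o =>
      rw [pvFold_match k ks o items none (by simp) h]
      rfl
    | none =>
      have := pvFold_nomatch k ks items none h
      simp only [Option.map_none] at this
      rw [this, ih]
      cases items.foldl (pvStep ks) none with
      | none => rfl
      | some pr => rfl

-- ===== VERDICT (by name: the statement is the Claim_ definition above) =====
theorem pick_numeric_like_py_spec : Claim_equal_pick_numeric_like_py := by
  intro cols _
  unfold Spec_pick_numeric_like_py pick_numeric_like_py pick_numeric_like_py_alt
  rw [show pvPreferredA = pvPreferredB from rfl, show pvLowMapA = pvLowMapB from rfl, pvSearch_eq]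
  cases (pvLowMapB cols).items.foldl (pvStep pvPreferredB) none with
  | none => rfl
  | some pr => rfl
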